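-- pv_equiv track=rewrite | github.com/ilias6/pyJedAI | pyjedai/parallel/multiprocess_block_building.py | qgrams_combinations
-- ===== SOURCE A (Python) =====
-- def qgrams_combinations(sublists: list, sublist_length: int) -> list:
--     if sublist_length == 0 or len(sublists) < sublist_length:
--         return []
--
--     remaining_elements = sublists.copy()
--     last_sublist = remaining_elements.pop(len(sublists)-1)
--
--     combinations_exclusive_x = qgrams_combinations(remaining_elements, sublist_length)
--     combinations_inclusive_x = qgrams_combinations(remaining_elements, sublist_length-1)
--
--     resulting_combinations = combinations_exclusive_x.copy() if combinations_exclusive_x else []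
--
--     if not combinations_inclusive_x: # is empty
--         resulting_combinations.append(last_sublist)
--     else:
--         for combination in combinations_inclusive_x:
--             resulting_combinations.append(combination+last_sublist)
--
--     return resulting_combinations
-- ===== SOURCE B (Python) =====
-- def qgrams_combinations(sublists: list, sublist_length: int) -> list:
--     if sublist_length <= 0 or len(sublists) < sublist_length:
--         return []
--     # comb[j] = all concatenations of j elements chosen (in order) from the
--     # prefix processed so far; one left-to-right pass, each subproblem built once.
--     comb = [['']] + [[] for _ in range(sublist_length)]
--     for x in sublists:
--         comb = [comb[0]] + [comb[j] + [c + x for c in comb[j - 1]]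
--                             for j in range(1, sublist_length + 1)]
--     return comb[sublist_length]
-- ===== Notes on version B (the rewrite author's own statement) =====
-- stated objective: alternative
-- what changed: Replaced the include/exclude recursion on the last element (which recomputes overlapping subproblems exponentially) by a single left-to-right dynamic-programming pass that maintains, for each j <= k, the list of concatenations of j chosen elements, updating the whole table once per element.
import Mathlib
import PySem

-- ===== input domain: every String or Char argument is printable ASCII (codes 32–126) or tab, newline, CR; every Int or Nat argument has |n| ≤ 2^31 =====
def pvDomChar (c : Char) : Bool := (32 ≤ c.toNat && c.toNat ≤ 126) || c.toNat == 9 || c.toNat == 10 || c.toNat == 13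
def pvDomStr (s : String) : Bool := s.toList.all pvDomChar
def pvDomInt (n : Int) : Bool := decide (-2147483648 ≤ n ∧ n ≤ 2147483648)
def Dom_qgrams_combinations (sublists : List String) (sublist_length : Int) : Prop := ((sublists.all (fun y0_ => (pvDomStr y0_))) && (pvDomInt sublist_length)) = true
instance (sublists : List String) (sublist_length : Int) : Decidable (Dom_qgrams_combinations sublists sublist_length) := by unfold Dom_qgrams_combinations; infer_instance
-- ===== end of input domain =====

-- B replaces A's include/exclude recursion on the last element by one left-to-right DP pass
-- over a table of combinations-per-size; equivalence is about return values (A mutates only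
-- its own copies of the input).

-- ===== PORT A =====
-- Literal port of A's recursion: pop the last element, recurse twice, append.
-- `getLast? = none` is where Python's `pop` on an empty list raises IndexError
-- (reachable only for sublist_length < 0, excluded by Pre_).
def qgrams_combinations (sublists : List String) (sublist_length : Int) : List String :=
  if sublist_length == 0 || (sublists.length : Int) < sublist_length then []
  else
    match h : sublists.getLast? with
    | none => []   -- Python raises IndexError here; outside Pre_
    | some last_sublist =>
      let remaining_elements := sublists.dropLast
      let combinations_exclusive_x := qgrams_combinations remaining_elements sublist_length
      let combinations_inclusive_x := qgrams_combinations remaining_elements (sublist_length - 1)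
      if combinations_inclusive_x.isEmpty then
        combinations_exclusive_x ++ [last_sublist]
      else
        combinations_exclusive_x ++ combinations_inclusive_x.map (fun combination => combination ++ last_sublist)
termination_by sublists.length
decreasing_by
  all_goals
    have hne : sublists ≠ [] := by intro hnil; rw [hnil] at h; simp at h
    have : 0 < sublists.length := List.length_pos_iff.mpr hne
    simp [List.length_dropLast]; omega

-- ===== PORT B =====
-- Source B's per-element table update `[comb[0]] + [comb[j] + [c + x for c in comb[j-1]] ...]`
-- reads only the previous table, so it is exactly this simultaneous zipWith of the old
-- table with its own tail.
def qgrams_combinations_alt (sublists : List String) (sublist_length : Int) : List String :=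
  if sublist_length ≤ 0 || (sublists.length : Int) < sublist_length then []
  else
    let K := sublist_length.toNat
    let comb0 : List (List String) := [""] :: List.replicate K ([] : List String)
    let final := sublists.foldl
      (fun comb x =>
        comb.headD [] ::
          List.zipWith (fun prev cur => cur ++ prev.map (fun c => c ++ x)) comb comb.tail)
      comb0
    final.getD K []

-- ===== PRECONDITION & SPEC =====
-- A raises IndexError on every input with sublist_length < 0 (it pops from an
-- ever-shrinking list whose guard never fires); Pre_ excludes exactly those inputs.
def Pre_qgrams_combinations (sublists : List String) (sublist_length : Int) : Prop :=
  0 ≤ sublist_length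
instance (sublists : List String) (sublist_length : Int) : Decidable (Pre_qgrams_combinations sublists sublist_length) := by unfold Pre_qgrams_combinations; infer_instance

def pvWitness_qgrams_combinations : List String × Int := (["ab", "cd", "ef"], 2)

def Spec_qgrams_combinations (sublists : List String) (sublist_length : Int) (out : List String) : Prop := out = qgrams_combinations_alt sublists sublist_length
instance (sublists : List String) (sublist_length : Int) (out : List String) : Decidable (Spec_qgrams_combinations sublists sublist_length out) := by unfold Spec_qgrams_combinations; infer_instance

-- ===== CLAIM (what is proved, stated in full; the proofs are below) =====
def Claim_equal_qgrams_combinations : Prop := ∀ (sublists : List String) (sublist_length : Int), Dom_qgrams_combinations sublists sublist_length → Pre_qgrams_combinations sublists sublist_length → Spec_qgrams_combinations sublists sublist_length (qgrams_combinations sublists sublist_length)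


-- ===== LEMMAS AND PROOFS =====

-- row j of the DP table: [""] at j = 0, A's combinations of size j otherwise
def pvRow (sl : List String) (j : Int) : List String :=
  if j = 0 then [""] else qgrams_combinations sl j

-- the table [pvRow sl j, pvRow sl (j+1), …, pvRow sl (j+n-1)]
def pvTb (sl : List String) (j : Int) : Nat → List (List String)
  | 0 => []
  | n + 1 => pvRow sl j :: pvTb sl (j + 1) n

theorem pvA_nil (j : Int) (_hj : 1 ≤ j) : qgrams_combinations [] j = [] := by
  unfold qgrams_combinations
  simp

-- one unfolding step of A at a list with last element `last`, guard known false
theorem pvA_cons_unfold (sl : List String) (last : String) (hl : sl.getLast? = some last)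
    (j : Int) (hg : ¬ (j == 0 || decide ((sl.length : Int) < j)) = true) :
    qgrams_combinations sl j =
      (if (qgrams_combinations sl.dropLast (j - 1)).isEmpty then
        qgrams_combinations sl.dropLast j ++ [last]
      else
        qgrams_combinations sl.dropLast j ++
          (qgrams_combinations sl.dropLast (j - 1)).map (fun c => c ++ last)) := by
  conv_lhs => unfold qgrams_combinations
  rw [if_neg hg]
  split
  · next heq => rw [hl] at heq; cases heq
  · next l2 heq => rw [hl] at heq; injection heq with h2; subst h2; rfl

theorem pvA_ne_nil (sl : List String) (j : Int) (h1 : 1 ≤ j) (h2 : j ≤ (sl.length : Int)) :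
    qgrams_combinations sl j ≠ [] := by
  have hne : sl ≠ [] := by
    intro hnil; subst hnil; simp at h2; omega
  have hg : ¬ (j == 0 || decide ((sl.length : Int) < j)) = true := by
    simp; omega
  obtain ⟨last, hl⟩ := List.getLast?_isSome.mpr hne |> Option.isSome_iff_exists.mp
  rw [pvA_cons_unfold sl last hl j hg]
  split_ifs with hc
  · simp
  · have hne' : qgrams_combinations sl.dropLast (j - 1) ≠ [] := by
      simpa [List.isEmpty_iff] using hc
    simp [hne']

-- A's recurrence on a snoc: the new size-j combinations are the old ones plus
-- the old size-(j-1) combinations (with "" for size 0) each extended by x.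
theorem pvA_snoc (sl : List String) (x : String) (j : Int) (hj : 1 ≤ j) :
    qgrams_combinations (sl ++ [x]) j
      = qgrams_combinations sl j ++ (pvRow sl (j - 1)).map (fun c => c ++ x) := by
  by_cases hlen : ((sl ++ [x]).length : Int) < j
  · have hlen' : (sl.length : Int) < j := by simp at hlen; omega
    have hA : qgrams_combinations (sl ++ [x]) j = [] := by
      unfold qgrams_combinations; simp at hlen ⊢; omega
    have hB : qgrams_combinations sl j = [] := by
      unfold qgrams_combinations; simp; omega
    have hj1 : ¬ (j - 1 = 0) := by simp at hlen; omega
    have hC : qgrams_combinations sl (j - 1) = [] := by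
      unfold qgrams_combinations; simp at hlen ⊢; omega
    rw [hA, hB, pvRow, if_neg hj1, hC]; rfl
  · have hg : ¬ (j == 0 || decide (((sl ++ [x]).length : Int) < j)) = true := by
      simp; constructor
      · omega
      · simpa using hlen
    have hlast : (sl ++ [x]).getLast? = some x := by simp
    rw [pvA_cons_unfold (sl ++ [x]) x hlast j hg]
    simp only [List.dropLast_concat]
    by_cases hj1 : j = 1
    · subst hj1
      have h0 : qgrams_combinations sl 0 = [] := by unfold qgrams_combinations; simp
      simp [h0, pvRow]
    · have hlen2 : (1:Int) ≤ j - 1 := by omega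
      have hlen3 : j - 1 ≤ (sl.length : Int) := by simp at hlen; omega
      have hne := pvA_ne_nil sl (j - 1) hlen2 hlen3
      have hie : ¬ (qgrams_combinations sl (j - 1)).isEmpty = true := by
        simpa [List.isEmpty_iff] using hne
      rw [if_neg hie, pvRow, if_neg (by omega : ¬ (j - 1 = 0))]

-- the zipWith step turns the table for sl into the table for sl ++ [x], shifted by one row
theorem pvZip_tb (sl : List String) (x : String) :
    ∀ (n : Nat) (j : Int), 0 ≤ j →
    List.zipWith (fun prev cur => cur ++ prev.map (fun c => c ++ x))
        (pvTb sl j (n + 1)) (pvTb sl j (n + 1)).tail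
      = pvTb (sl ++ [x]) (j + 1) n := by
  intro n
  induction n with
  | zero => intro j hj; simp [pvTb]
  | succ m ih =>
    intro j hj
    have hrec := ih (j + 1) (by omega)
    have hhead : pvRow sl (j + 1) ++ (pvRow sl j).map (fun c => c ++ x)
        = pvRow (sl ++ [x]) (j + 1) := by
      have hs := pvA_snoc sl x (j + 1) (by omega)
      have he : j + 1 - 1 = j := by ring
      rw [he] at hs
      rw [show pvRow sl (j + 1) = qgrams_combinations sl (j + 1) from by
            rw [pvRow, if_neg (by omega : ¬ (j + 1 = 0))],
          show pvRow (sl ++ [x]) (j + 1) = qgrams_combinations (sl ++ [x]) (j + 1) from by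
            rw [pvRow, if_neg (by omega : ¬ (j + 1 = 0))],
          hs]
    show (pvRow sl (j + 1) ++ (pvRow sl j).map (fun c => c ++ x)) ::
        List.zipWith (fun prev cur => cur ++ prev.map (fun c => c ++ x))
          (pvTb sl (j + 1) (m + 1)) (pvTb sl (j + 1) (m + 1)).tail
      = pvTb (sl ++ [x]) (j + 1) (m + 1)
    rw [hrec, hhead]
    rfl

-- the fold maintains the table
theorem pvFold_tb (K : Nat) :
    ∀ (sl : List String),
    sl.foldl
      (fun comb x =>
        comb.headD [] ::
          List.zipWith (fun prev cur => cur ++ prev.map (fun c => c ++ x)) comb comb.tail)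
      ([""] :: List.replicate K ([] : List String))
      = pvTb sl 0 (K + 1) := by
  have hbase : ([""] :: List.replicate K ([] : List String)) = pvTb [] 0 (K + 1) := by
    suffices h : ∀ (n : Nat) (j : Int), 1 ≤ j → List.replicate n ([] : List String) = pvTb [] j n by
      have h0 : pvTb [] 0 (K+1) = pvRow [] 0 :: pvTb [] 1 K := by simp [pvTb]
      rw [h0, pvRow, if_pos rfl, ← h K 1 (by omega)]
    intro n
    induction n with
    | zero => intro j hj; simp [pvTb]
    | succ m ih =>
      intro j hj
      rw [List.replicate_succ]
      show ([] : List String) :: List.replicate m [] = pvRow [] j :: pvTb [] (j+1) m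
      rw [ih (j+1) (by omega), pvRow, if_neg (by omega : ¬ (j = 0)), pvA_nil j hj]
  intro sl
  induction sl using List.reverseRecOn with
  | nil => exact hbase
  | append_singleton sl x ih =>
    rw [List.foldl_append, ih, List.foldl_cons, List.foldl_nil]
    show (pvTb sl 0 (K + 1)).headD [] ::
        List.zipWith (fun prev cur => cur ++ prev.map (fun c => c ++ x))
          (pvTb sl 0 (K + 1)) (pvTb sl 0 (K + 1)).tail
      = pvTb (sl ++ [x]) 0 (K + 1)
    rw [pvZip_tb sl x K 0 (by omega)]
    show pvRow sl 0 :: pvTb (sl ++ [x]) (0 + 1) K = pvRow (sl ++ [x]) 0 :: pvTb (sl ++ [x]) (0 + 1) K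
    simp [pvRow]

theorem pvTb_getD (sl : List String) :
    ∀ (n : Nat) (j : Int), (pvTb sl j (n + 1)).getD n [] = pvRow sl (j + n) := by
  intro n
  induction n with
  | zero => intro j; simp [pvTb]
  | succ m ih =>
    intro j
    show (pvRow sl j :: pvTb sl (j+1) (m+1)).getD (m+1) [] = _
    rw [List.getD_cons_succ, ih (j+1)]
    congr 1
    push_cast
    ring

-- ===== VERDICT (by name: the statement is the Claim_ definition above) =====
theorem qgrams_combinations_spec : Claim_equal_qgrams_combinations := by
  intro sl k _ hpre
  unfold Spec_qgrams_combinations qgrams_combinations_alt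
  have hpre' : (0:Int) ≤ k := hpre
  by_cases hz : k = 0
  · subst hz
    simp [qgrams_combinations]
  by_cases hlen : (sl.length : Int) < k
  · have hA : qgrams_combinations sl k = [] := by
      unfold qgrams_combinations; simp; omega
    rw [if_pos (by simp; omega), hA]
  · rw [if_neg (by simp; omega)]
    simp only [pvFold_tb]
    rw [pvTb_getD sl k.toNat 0]
    rw [pvRow, if_neg (by omega : ¬ ((0:Int) + k.toNat = 0))]
    congr 1
    omega
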